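-- pv_equiv track=rewrite | github.com/Muditsingal044/niet_codetantra | Competitive Coding - 1/3.Probelms on Mathematics/6.py | isDivisibleBy41
-- ===== SOURCE A (Python) =====
-- def isDivisibleBy41(d1, d2, c, L):
--   d = [d1,d2]+[0]*(L-2)
--   for i in range(2,L):
--     d[i] = (d[i-1]*c + d[i-2])%10
--
--   num = 0
--   for i in range(L):
--     num+=d[i]*10**(L-i-1)
--
--   return num%41==0
-- ===== SOURCE B (Python) =====
-- def isDivisibleBy41(d1, d2, c, L):
--     # O(L) constant-space: carry the remainder mod 41 (Horner) and only the
--     # last two digits of the recurrence, instead of building the big integer.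
--     if L <= 0:
--         return True
--     if L == 1:
--         return d1 % 41 == 0
--     r = (d1 % 41 * 10 + d2) % 41
--     a, b = d1, d2
--     for _ in range(L - 2):
--         a, b = b, (b * c + a) % 10
--         r = (r * 10 + b) % 41
--     return r == 0
-- ===== Notes on version B (the rewrite author's own statement) =====
-- stated objective: faster
-- what changed: B accumulates the number's remainder mod 41 with a Horner update and keeps only the last two recurrence digits, instead of materialising the digit list and summing d[i]*10**(L-i-1) into an L-digit bigint.
import Mathlib
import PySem

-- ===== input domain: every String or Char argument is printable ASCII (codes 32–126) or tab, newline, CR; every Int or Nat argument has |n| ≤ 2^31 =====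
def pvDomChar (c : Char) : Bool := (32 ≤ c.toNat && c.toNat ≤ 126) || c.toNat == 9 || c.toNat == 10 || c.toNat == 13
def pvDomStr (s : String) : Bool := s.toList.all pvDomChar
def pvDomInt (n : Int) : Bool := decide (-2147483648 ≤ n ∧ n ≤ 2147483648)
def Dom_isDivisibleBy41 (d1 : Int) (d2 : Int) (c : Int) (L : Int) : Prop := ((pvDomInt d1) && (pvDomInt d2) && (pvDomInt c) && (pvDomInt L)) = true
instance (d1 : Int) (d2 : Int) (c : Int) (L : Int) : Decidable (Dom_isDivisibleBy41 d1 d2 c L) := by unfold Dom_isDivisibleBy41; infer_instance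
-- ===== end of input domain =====

-- B replaces A's bigint construction (digit list, then Σ d[i]*10^(L-i-1), then % 41)
-- by an O(L), O(1)-space Horner accumulation of the remainder mod 41.

-- ===== PORT A =====
def isDivisibleBy41 (d1 : Int) (d2 : Int) (c : Int) (L : Int) : Bool :=
  let d0 := [d1, d2] ++ List.replicate (L - 2).toNat 0
  let d := (PySem.List.pyRange 2 L 1).foldl
    (fun d i => PySem.List.pySetD d i
      (PySem.Int.mod (PySem.List.pyGetD d (i - 1) 0 * c + PySem.List.pyGetD d (i - 2) 0) 10)) d0
  let num := (PySem.List.pyRange 0 L 1).foldl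
    (fun num i => num + PySem.List.pyGetD d i 0 * 10 ^ (L - i - 1).toNat) 0
  decide (PySem.Int.mod num 41 = 0)

-- ===== PORT B =====
def isDivisibleBy41_alt (d1 : Int) (d2 : Int) (c : Int) (L : Int) : Bool :=
  if L ≤ 0 then true
  else if L = 1 then decide (PySem.Int.mod d1 41 = 0)
  else
    let s := (PySem.List.pyRange 0 (L - 2) 1).foldl
      (fun (s : Int × Int × Int) _ =>
        let b' := PySem.Int.mod (s.2.1 * c + s.1) 10
        (s.2.1, b', PySem.Int.mod (s.2.2 * 10 + b') 41))
      (d1, d2, PySem.Int.mod (PySem.Int.mod d1 41 * 10 + d2) 41)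
    decide (s.2.2 = 0)

-- ===== PRECONDITION & SPEC =====
def Spec_isDivisibleBy41 (d1 : Int) (d2 : Int) (c : Int) (L : Int) (out : Bool) : Prop := out = isDivisibleBy41_alt d1 d2 c L
instance (d1 : Int) (d2 : Int) (c : Int) (L : Int) (out : Bool) : Decidable (Spec_isDivisibleBy41 d1 d2 c L out) := by unfold Spec_isDivisibleBy41; infer_instance

-- ===== CLAIM (what is proved, stated in full; the proofs are below) =====
def Claim_equal_isDivisibleBy41 : Prop := ∀ (d1 : Int) (d2 : Int) (c : Int) (L : Int), Dom_isDivisibleBy41 d1 d2 c L → Spec_isDivisibleBy41 d1 d2 c L (isDivisibleBy41 d1 d2 c L)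

-- ===== LEMMAS AND PROOFS =====

-- the digit sequence d[0], d[1], d[2], …
def pvF (d1 d2 c : Int) : Nat → Int
  | 0 => d1
  | 1 => d2
  | n + 2 => PySem.Int.mod (pvF d1 d2 c (n + 1) * c + pvF d1 d2 c n) 10

-- Horner value of the first k digits
def pvH (d1 d2 c : Int) : Nat → Int
  | 0 => 0
  | k + 1 => pvH d1 d2 c k * 10 + pvF d1 d2 c k

theorem pv_mod41 (a b : Int) : (a % 41 * 10 + b) % 41 = (a * 10 + b) % 41 := by
  omega

-- A's fill loop: invariant
theorem pv_fill (d1 d2 c : Int) (n : Nat) : ∀ k, 2 ≤ k → k ≤ n →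
    (PySem.List.pyRange 2 (k : Int) 1).foldl
      (fun d i => PySem.List.pySetD d i
        (PySem.Int.mod (PySem.List.pyGetD d (i - 1) 0 * c + PySem.List.pyGetD d (i - 2) 0) 10))
      ([d1, d2] ++ List.replicate (n - 2) 0)
    = (List.range k).map (pvF d1 d2 c) ++ List.replicate (n - k) 0 := by
  intro k
  induction k with
  | zero => omega
  | succ k ih =>
    intro h2 hkn
    rcases Nat.lt_or_ge k 2 with hk | hk
    · interval_cases k
      · omega
      · simp [PySem.List.pyRange_one_eq_nil (by norm_num : (2:Int) ≤ 2),
          List.range_succ, pvF]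
    · have hsplit : PySem.List.pyRange 2 ((k:Int)+1) 1
          = PySem.List.pyRange 2 (k:Int) 1 ++ [(k:Int)] :=
        PySem.List.pyRange_one_succ_right (by exact_mod_cast hk)
      have : ((k+1 : Nat) : Int) = (k:Int) + 1 := by push_cast; ring
      rw [this, hsplit, List.foldl_append, ih hk (by omega)]
      -- now one step at index k on M := map pvF (range k) ++ replicate (n-k) 0
      have hlenM : ((List.range k).map (pvF d1 d2 c)).length = k := by simp
      have hget1 : PySem.List.pyGetD
          ((List.range k).map (pvF d1 d2 c) ++ List.replicate (n - k) 0) ((k:Int) - 1) 0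
          = pvF d1 d2 c (k - 1) := by
        have hcast : (k:Int) - 1 = ((k - 1 : Nat) : Int) := by omega
        rw [hcast, PySem.List.pyGetD_natCast]
        rw [List.getD_eq_getElem?_getD, List.getElem?_append_left (by simp; omega)]
        simp [List.getElem?_map, List.getElem?_range (show k - 1 < k by omega)]
      have hget2 : PySem.List.pyGetD
          ((List.range k).map (pvF d1 d2 c) ++ List.replicate (n - k) 0) ((k:Int) - 2) 0
          = pvF d1 d2 c (k - 2) := by
        have hcast : (k:Int) - 2 = ((k - 2 : Nat) : Int) := by omega
        rw [hcast, PySem.List.pyGetD_natCast]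
        rw [List.getD_eq_getElem?_getD, List.getElem?_append_left (by simp; omega)]
        simp [List.getElem?_map, List.getElem?_range (show k - 2 < k by omega)]
      simp only [List.foldl_cons, List.foldl_nil, hget1, hget2]
      rw [PySem.List.pySetD_natCast]
      have hrep : List.replicate (n - k) (0:Int) = 0 :: List.replicate (n - (k+1)) 0 := by
        have : n - k = (n - (k+1)) + 1 := by omega
        rw [this, List.replicate_succ]
      rw [hrep, show ((List.range k).map (pvF d1 d2 c) ++ 0 :: List.replicate (n - (k+1)) (0:Int)).set k
            (PySem.Int.mod (pvF d1 d2 c (k-1) * c + pvF d1 d2 c (k-2)) 10)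
          = (List.range k).map (pvF d1 d2 c)
            ++ (PySem.Int.mod (pvF d1 d2 c (k-1) * c + pvF d1 d2 c (k-2)) 10)
               :: List.replicate (n - (k+1)) 0 from by
        rw [List.set_append_right _ _ (by simp)]
        simp]
      have hfk : PySem.Int.mod (pvF d1 d2 c (k-1) * c + pvF d1 d2 c (k-2)) 10 = pvF d1 d2 c k := by
        have : k = (k - 2) + 2 := by omega
        rw [this]
        have h1 : k - 2 + 1 = k - 1 := by omega
        simp [pvF, h1]
      rw [hfk, List.range_succ, List.map_append]
      simp
-- A's sum loop: invariant (partial sum = Horner prefix shifted)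
theorem pv_sum (d1 d2 c : Int) (n : Nat) : ∀ k, k ≤ n →
    (PySem.List.pyRange 0 (k : Int) 1).foldl
      (fun num i => num + PySem.List.pyGetD ((List.range n).map (pvF d1 d2 c)) i 0
        * 10 ^ ((n : Int) - i - 1).toNat) 0
    = pvH d1 d2 c k * 10 ^ (n - k) := by
  intro k
  induction k with
  | zero => simp [pvH, PySem.List.pyRange_one_eq_nil (by norm_num : (0:Int) ≤ 0)]
  | succ k ih =>
    intro hkn
    have hsplit : PySem.List.pyRange 0 ((k:Int)+1) 1
        = PySem.List.pyRange 0 (k:Int) 1 ++ [(k:Int)] :=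
      PySem.List.pyRange_one_succ_right (by positivity)
    have hc : ((k+1 : Nat) : Int) = (k:Int) + 1 := by push_cast; ring
    rw [hc, hsplit, List.foldl_append, ih (by omega)]
    have hget : PySem.List.pyGetD ((List.range n).map (pvF d1 d2 c)) (k:Int) 0
        = pvF d1 d2 c k := by
      rw [PySem.List.pyGetD_natCast]
      rw [List.getD_eq_getElem?_getD]
      simp [List.getElem?_map, List.getElem?_range (show k < n by omega)]
    have hexp : ((n:Int) - (k:Int) - 1).toNat = n - (k+1) := by omega
    have hpow : (10:Int) ^ (n - k) = 10 ^ (n - (k+1)) * 10 := by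
      rw [← pow_succ]; congr 1; omega
    simp only [List.foldl_cons, List.foldl_nil, hget, hexp, pvH]
    rw [hpow]
    ring

-- B's loop: invariant
theorem pv_alt (d1 d2 c : Int) : ∀ m : Nat,
    (PySem.List.pyRange 0 (m : Int) 1).foldl
      (fun (s : Int × Int × Int) _ =>
        let b' := PySem.Int.mod (s.2.1 * c + s.1) 10
        (s.2.1, b', PySem.Int.mod (s.2.2 * 10 + b') 41))
      (d1, d2, PySem.Int.mod (PySem.Int.mod d1 41 * 10 + d2) 41)
    = (pvF d1 d2 c m, pvF d1 d2 c (m + 1), PySem.Int.mod (pvH d1 d2 c (m + 2)) 41) := by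
  intro m
  induction m with
  | zero =>
    simp [PySem.List.pyRange_one_eq_nil (by norm_num : (0:Int) ≤ 0), pvF, pvH, pv_mod41]
  | succ m ih =>
    have hc : ((m+1 : Nat) : Int) = (m:Int) + 1 := by push_cast; ring
    have hsplit : PySem.List.pyRange 0 ((m:Int)+1) 1
        = PySem.List.pyRange 0 (m:Int) 1 ++ [(m:Int)] :=
      PySem.List.pyRange_one_succ_right (by positivity)
    rw [hc, hsplit, List.foldl_append, ih]
    simp only [List.foldl_cons, List.foldl_nil]
    refine Prod.ext rfl (Prod.ext ?_ ?_)
    · show PySem.Int.mod (pvF d1 d2 c (m+1) * c + pvF d1 d2 c m) 10 = pvF d1 d2 c (m + 1 + 1)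
      rfl
    · show PySem.Int.mod (PySem.Int.mod (pvH d1 d2 c (m+2)) 41 * 10
          + PySem.Int.mod (pvF d1 d2 c (m+1) * c + pvF d1 d2 c m) 10) 41
        = PySem.Int.mod (pvH d1 d2 c (m + 1 + 2)) 41
      have hf : PySem.Int.mod (pvF d1 d2 c (m+1) * c + pvF d1 d2 c m) 10 = pvF d1 d2 c (m+2) := rfl
      rw [hf]
      simp only [PySem.Int.mod_eq_emod_of_pos (show (0:Int) < 41 by norm_num)]
      rw [pv_mod41]
      rfl

theorem pv_main (d1 d2 c L : Int) : isDivisibleBy41 d1 d2 c L = isDivisibleBy41_alt d1 d2 c L := by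
  by_cases hL : L ≤ 0
  · -- L ≤ 0: both loops are empty in A, num = 0
    simp [isDivisibleBy41, isDivisibleBy41_alt, hL,
      PySem.List.pyRange_one_eq_nil (show L ≤ 2 by omega),
      PySem.List.pyRange_one_eq_nil (show L ≤ 0 from hL)]
  · by_cases h1 : L = 1
    · -- L = 1
      subst h1
      have h01 : PySem.List.pyRange 0 1 1 = [(0:Int)] := by
        rw [PySem.List.pyRange_one_cons (show (0:Int) < 1 by norm_num),
          PySem.List.pyRange_one_eq_nil (show (1:Int) ≤ 0 + 1 by norm_num)]
      norm_num [isDivisibleBy41, isDivisibleBy41_alt, h01,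
        PySem.List.pyRange_one_eq_nil (show (1:Int) ≤ 2 by norm_num),
        PySem.List.pyGetD_zero_cons]
    · -- L ≥ 2
      have h2 : (2:Int) ≤ L := by omega
      obtain ⟨n, rfl⟩ : ∃ n : Nat, L = (n : Int) := ⟨L.toNat, by omega⟩
      have hn : 2 ≤ n := by exact_mod_cast h2
      have hrep : ((n:Int) - 2).toNat = n - 2 := by omega
      unfold isDivisibleBy41 isDivisibleBy41_alt
      rw [if_neg (by omega), if_neg (by omega)]
      have hd : ([d1, d2] ++ List.replicate ((n:Int) - 2).toNat (0:Int))
          = [d1, d2] ++ List.replicate (n - 2) 0 := by rw [hrep]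
      simp only [hd]
      have hfill := pv_fill d1 d2 c n n hn le_rfl
      simp only [hfill, Nat.sub_self, List.replicate_zero, List.append_nil]
      have hsum := pv_sum d1 d2 c n n le_rfl
      simp only [Nat.sub_self, pow_zero, mul_one] at hsum
      simp only [hsum]
      have hm : (n:Int) - 2 = ((n - 2 : Nat) : Int) := by omega
      rw [hm, pv_alt d1 d2 c (n - 2)]
      have : n - 2 + 2 = n := by omega
      rw [this]

-- ===== VERDICT (by name: the statement is the Claim_ definition above) =====
theorem isDivisibleBy41_spec : Claim_equal_isDivisibleBy41 := by
  intro d1 d2 c L _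
  exact pv_main d1 d2 c L
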